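-- pv_equiv track=rewrite | github.com/snewhouse/glu-genetics | projects/Scripts/completion2.py | count_missing
-- ===== SOURCE A (Python) =====
-- def count_missing(genotriples):
--   '''
--   Count missing genotype by locus/sample
--
--   @param genotriples: genotype triplets
--   @type  genotriples: tuple
--
--   >>> genotriples = ('1420_11', 'rs2070', 17),('1420_12', 'rs2070', 19),('1420_2', 'rs2070', 0)
--   >>> count_missing(genotriples)
--   ({'1420_2': [0, 1], '1420_11': [1, 0], '1420_12': [1, 0]}, {'rs2070': [2, 1]})
--   '''
--   samcomp = {}
--   loccomp = {}
--
--   for sample,locus,geno in genotriples: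
--     g = not geno
--     samcomp.setdefault(sample,[0,0])[g] += 1
--     loccomp.setdefault(locus,[0,0])[g] += 1
--   return samcomp,loccomp
-- ===== SOURCE B (Python) =====
-- def count_missing(genotriples):
--   # One pass maintaining total and missing counters per sample/locus,
--   # then each result dict is built by a comprehension over the totals.
--   tot_s = {}
--   tot_l = {}
--   mis_s = {}
--   mis_l = {}
--   for sample, locus, geno in genotriples:
--     tot_s[sample] = tot_s.get(sample, 0) + 1
--     tot_l[locus] = tot_l.get(locus, 0) + 1
--     if not geno:
--       mis_s[sample] = mis_s.get(sample, 0) + 1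
--       mis_l[locus] = mis_l.get(locus, 0) + 1
--   samcomp = {k: [t - mis_s.get(k, 0), mis_s.get(k, 0)] for k, t in tot_s.items()}
--   loccomp = {k: [t - mis_l.get(k, 0), mis_l.get(k, 0)] for k, t in tot_l.items()}
--   return samcomp, loccomp
-- ===== Notes on version B (the rewrite author's own statement) =====
-- stated objective: alternative
-- what changed: Instead of mutating a [present,missing] list cell in place via setdefault and a bool index, B keeps flat total/missing integer counters per sample and per locus in one pass and assembles the result dicts afterwards with comprehensions over the totals (preserving first-appearance order).
import Mathlib
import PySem

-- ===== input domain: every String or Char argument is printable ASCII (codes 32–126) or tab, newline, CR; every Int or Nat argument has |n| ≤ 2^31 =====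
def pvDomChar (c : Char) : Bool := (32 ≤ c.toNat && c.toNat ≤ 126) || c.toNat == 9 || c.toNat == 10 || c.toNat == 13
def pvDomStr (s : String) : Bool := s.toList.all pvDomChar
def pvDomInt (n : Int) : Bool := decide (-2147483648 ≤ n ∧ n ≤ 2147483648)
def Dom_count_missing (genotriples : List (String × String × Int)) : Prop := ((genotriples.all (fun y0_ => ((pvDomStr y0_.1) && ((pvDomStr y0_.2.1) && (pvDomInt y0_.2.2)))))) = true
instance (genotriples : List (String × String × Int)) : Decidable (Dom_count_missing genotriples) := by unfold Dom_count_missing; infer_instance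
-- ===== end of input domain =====

-- B replaces A's in-place mutation of a [present, missing] cell (setdefault + bool index)
-- by flat total/missing integer counters maintained in one pass, assembling the result
-- dicts afterwards from the totals; objective: alternative decomposition, same cost.

-- ===== PORT A =====
-- loop body of A: samcomp.setdefault(sample,[0,0])[g] += 1 (and likewise for locus);
-- g = not geno, i.e. index 1 when geno == 0 else 0; setdefault+index assignment is
-- exactly Dict.modify with default [0,0] (new keys append, existing keep position).
def count_missing_stepA (st : PySem.Dict String (List Int) × PySem.Dict String (List Int))
    (x : String × String × Int) : PySem.Dict String (List Int) × PySem.Dict String (List Int) :=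
  match st, x with
  | (samcomp, loccomp), (sample, locus, geno) =>
    let g : Int := if geno == 0 then 1 else 0
    (samcomp.modify sample [0, 0] (fun v => PySem.List.pySetD v g (PySem.List.pyGetD v g 0 + 1)),
     loccomp.modify locus [0, 0] (fun v => PySem.List.pySetD v g (PySem.List.pyGetD v g 0 + 1)))

def count_missing (genotriples : List (String × String × Int)) : (List (String × List Int)) × (List (String × List Int)) :=
  let p := genotriples.foldl count_missing_stepA (PySem.Dict.empty, PySem.Dict.empty)
  (p.1.items, p.2.items)

-- ===== PORT B =====
-- loop body of B: bump total counters for sample and locus; bump missing counters when not geno.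
def count_missing_stepB
    (st : PySem.Dict String Int × PySem.Dict String Int × PySem.Dict String Int × PySem.Dict String Int)
    (x : String × String × Int) :
    PySem.Dict String Int × PySem.Dict String Int × PySem.Dict String Int × PySem.Dict String Int :=
  match st, x with
  | (totS, totL, misS, misL), (sample, locus, geno) =>
    (totS.modify sample 0 (· + 1), totL.modify locus 0 (· + 1),
     if geno == 0 then misS.modify sample 0 (· + 1) else misS,
     if geno == 0 then misL.modify locus 0 (· + 1) else misL)

def count_missing_alt (genotriples : List (String × String × Int)) : (List (String × List Int)) × (List (String × List Int)) :=
  let q := genotriples.foldl count_missing_stepB (PySem.Dict.empty, PySem.Dict.empty, PySem.Dict.empty, PySem.Dict.empty)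
  (q.1.items.map (fun p => (p.1, [p.2 - q.2.2.1.getD p.1 0, q.2.2.1.getD p.1 0])),
   q.2.1.items.map (fun p => (p.1, [p.2 - q.2.2.2.getD p.1 0, q.2.2.2.getD p.1 0])))

-- ===== PRECONDITION & SPEC =====
def Spec_count_missing (genotriples : List (String × String × Int)) (out : (List (String × List Int)) × (List (String × List Int))) : Prop := out = count_missing_alt genotriples
instance (genotriples : List (String × String × Int)) (out : (List (String × List Int)) × (List (String × List Int))) : Decidable (Spec_count_missing genotriples out) := by unfold Spec_count_missing; infer_instance

-- ===== CLAIM (what is proved, stated in full; the proofs are below) =====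
def Claim_equal_count_missing : Prop := ∀ (genotriples : List (String × String × Int)), Dom_count_missing genotriples → Spec_count_missing genotriples (count_missing genotriples)

-- ===== LEMMAS AND PROOFS =====

-- Invariant linking A's [present, missing] dict to B's total/missing counter dicts.
def CMRel (dA : PySem.Dict String (List Int)) (tot mis : PySem.Dict String Int) : Prop :=
  dA.keys = tot.keys ∧ tot.keys.Nodup ∧
  ∀ k, dA.getD k [0, 0] = [tot.getD k 0 - mis.getD k 0, mis.getD k 0]

lemma cmrel_empty : CMRel PySem.Dict.empty PySem.Dict.empty PySem.Dict.empty := by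
  refine ⟨rfl, PySem.Dict.nodup_keys_empty, fun k => ?_⟩
  simp [PySem.Dict.getD_empty]

lemma cmrel_step (s : String) (g : Int) {dA : PySem.Dict String (List Int)}
    {tot mis : PySem.Dict String Int} (h : CMRel dA tot mis) :
    CMRel (dA.modify s [0, 0] (fun v =>
            PySem.List.pySetD v (if g == 0 then 1 else 0)
              (PySem.List.pyGetD v (if g == 0 then 1 else 0) 0 + 1)))
          (tot.modify s 0 (· + 1))
          (if g == 0 then mis.modify s 0 (· + 1) else mis) := by
  obtain ⟨hk, hnd, hg⟩ := h
  have hc : dA.contains s = tot.contains s := by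
    rw [PySem.Dict.contains_eq_decide_mem_keys, PySem.Dict.contains_eq_decide_mem_keys, hk]
  refine ⟨?_, ?_, ?_⟩
  · rw [PySem.Dict.keys_modify, PySem.Dict.keys_modify]
    by_cases hmem : tot.contains s = true
    · rw [PySem.Dict.keys_insert_of_contains _ _ (hc ▸ hmem),
          PySem.Dict.keys_insert_of_contains _ _ hmem, hk]
    · rw [PySem.Dict.keys_insert_of_not_contains _ _ (by simp [hc, eq_false_of_ne_true hmem]),
          PySem.Dict.keys_insert_of_not_contains _ _ (eq_false_of_ne_true hmem), hk]
  · rw [PySem.Dict.keys_modify]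
    by_cases hmem : tot.contains s = true
    · rwa [PySem.Dict.keys_insert_of_contains _ _ hmem]
    · rw [PySem.Dict.keys_insert_of_not_contains _ _ (eq_false_of_ne_true hmem)]
      have : s ∉ tot.keys := fun hm =>
        hmem ((PySem.Dict.contains_iff_mem_keys tot s).mpr hm)
      simp [List.nodup_append, hnd]
      exact fun a ha h => this (h ▸ ha)
  · intro k
    rw [PySem.Dict.getD_modify, PySem.Dict.getD_modify]
    by_cases hks : k = s
    · subst hks
      rw [hg k]
      by_cases hgz : g == 0
      · simp only [hgz, if_true, PySem.Dict.getD_modify]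
        simp [PySem.List.pySetD, PySem.List.pySet?, PySem.List.pyGetD, PySem.List.pyGet?,
              PySem.List.pyIdx?]
      · simp only [hgz]
        simp [PySem.List.pySetD, PySem.List.pySet?, PySem.List.pyGetD, PySem.List.pyGet?,
              PySem.List.pyIdx?]
        omega
    · rw [if_neg hks, if_neg hks, hg k]
      by_cases hgz : g == 0
      · simp [hgz, PySem.Dict.getD_modify, if_neg hks]
      · simp [hgz]

lemma cmrel_loop : ∀ (l : List (String × String × Int))
    (sc lc : PySem.Dict String (List Int)) (ts tl ms ml : PySem.Dict String Int),
    CMRel sc ts ms → CMRel lc tl ml →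
    CMRel (l.foldl count_missing_stepA (sc, lc)).1
          (l.foldl count_missing_stepB (ts, tl, ms, ml)).1
          (l.foldl count_missing_stepB (ts, tl, ms, ml)).2.2.1 ∧
    CMRel (l.foldl count_missing_stepA (sc, lc)).2
          (l.foldl count_missing_stepB (ts, tl, ms, ml)).2.1
          (l.foldl count_missing_stepB (ts, tl, ms, ml)).2.2.2 := by
  intro l
  induction l with
  | nil => intro sc lc ts tl ms ml h1 h2; exact ⟨h1, h2⟩
  | cons x rest ih =>
    intro sc lc ts tl ms ml h1 h2
    obtain ⟨sample, locus, geno⟩ := x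
    simp only [List.foldl_cons, count_missing_stepA, count_missing_stepB]
    exact ih _ _ _ _ _ _ (cmrel_step sample geno h1) (cmrel_step locus geno h2)

lemma items_of_cmrel {dA : PySem.Dict String (List Int)} {tot mis : PySem.Dict String Int}
    (h : CMRel dA tot mis) :
    dA.items = tot.items.map (fun p => (p.1, [p.2 - mis.getD p.1 0, mis.getD p.1 0])) := by
  obtain ⟨hk, hnd, hg⟩ := h
  rw [PySem.Dict.items_eq_map_keys dA (hk ▸ hnd) [0, 0],
      PySem.Dict.items_eq_map_keys tot hnd 0, List.map_map, hk]
  exact List.map_congr_left (fun k _ => by simp [hg k])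

-- ===== VERDICT (by name: the statement is the Claim_ definition above) =====
theorem count_missing_spec : Claim_equal_count_missing := by
  intro l _
  unfold Spec_count_missing count_missing count_missing_alt
  obtain ⟨h1, h2⟩ := cmrel_loop l _ _ _ _ _ _ cmrel_empty cmrel_empty
  exact Prod.ext (items_of_cmrel h1) (items_of_cmrel h2)
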